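-- pv_equiv track=rewrite | github.com/Amirchiiik/HealthAiTracker | backend/app/services/doctor_recommendation_service.py | _deduplicate_and_prioritize
-- ===== SOURCE A (Python) =====
-- from typing import List, Dict, Any, Optional, Tuple
--
-- def _deduplicate_and_prioritize(recommendations: List[Dict[str, Any]]) -> List[Dict[str, Any]]:
--     """Remove duplicate specialists and prioritize by importance."""
--     seen_specialists = set()
--     unique_recommendations = []
--
--     # Sort by priority first
--     priority_order = {'high': 3, 'medium': 2, 'low': 1}
--     sorted_recommendations = sorted(
--         recommendations,
--         key=lambda x: priority_order.get(x.get('priority', 'medium'), 2),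
--         reverse=True
--     )
--
--     for rec in sorted_recommendations:
--         specialist_type = rec['type']
--         if specialist_type not in seen_specialists:
--             seen_specialists.add(specialist_type)
--             unique_recommendations.append(rec)
--
--     return unique_recommendations[:4]  # Limit to top 4 specialists
-- ===== SOURCE B (Python) =====
-- from typing import List, Dict, Any
--
-- def _deduplicate_and_prioritize(recommendations: List[Dict[str, Any]]) -> List[Dict[str, Any]]:
--     """Three stable passes over the input -- high, then medium/unknown, then low --
--     deduplicating by specialist type on the fly; no sort and no numeric key."""
--     seen_specialists = set()
--     unique_recommendations = []
--     for level in ('high', 'medium', 'low'):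
--         for rec in recommendations:
--             p = rec.get('priority', 'medium')
--             if p not in ('high', 'low'):
--                 p = 'medium'  # unknown priorities count as medium
--             if p == level:
--                 specialist_type = rec['type']
--                 if specialist_type not in seen_specialists:
--                     seen_specialists.add(specialist_type)
--                     unique_recommendations.append(rec)
--     return unique_recommendations[:4]
-- ===== Notes on version B (the rewrite author's own statement) =====
-- stated objective: alternative
-- what changed: Replaces A's comparison sort with a numeric priority key by three stable passes over the input (levels 'high', 'medium'/unknown, 'low') with dedup-by-type interleaved into the passes; no sort and no numeric key mapping at all.
import Mathlib
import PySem

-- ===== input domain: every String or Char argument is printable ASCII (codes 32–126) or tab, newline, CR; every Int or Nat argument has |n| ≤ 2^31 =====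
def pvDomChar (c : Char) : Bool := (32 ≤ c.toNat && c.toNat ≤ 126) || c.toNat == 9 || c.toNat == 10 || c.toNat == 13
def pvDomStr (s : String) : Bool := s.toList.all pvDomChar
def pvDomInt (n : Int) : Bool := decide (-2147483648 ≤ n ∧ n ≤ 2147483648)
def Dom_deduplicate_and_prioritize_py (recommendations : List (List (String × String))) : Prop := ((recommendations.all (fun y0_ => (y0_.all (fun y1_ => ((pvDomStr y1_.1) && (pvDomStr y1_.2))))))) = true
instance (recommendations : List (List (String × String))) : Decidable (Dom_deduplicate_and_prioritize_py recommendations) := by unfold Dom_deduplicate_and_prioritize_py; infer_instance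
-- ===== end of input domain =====

-- B makes three stable passes (high, medium/unknown, low) with dedup-by-type interleaved instead of A's comparison sort on a numeric key; return values agree wherever A returns.

-- ===== PORT A =====
-- A's sort key: priority_order.get(x.get('priority', 'medium'), 2)
def pvKeyA (x : List (String × String)) : Int :=
  (PySem.Dict.mk [("high", (3 : Int)), ("medium", 2), ("low", 1)]).getD
    ((PySem.Dict.mk x).getD "priority" "medium") 2

def deduplicate_and_prioritize_py (recommendations : List (List (String × String))) : List (List (String × String)) :=
  let sorted_recommendations := PySem.List.sorted recommendations pvKeyA true
  let st := sorted_recommendations.foldl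
    (fun (st : PySem.Set String × List (List (String × String))) rec =>
      match (PySem.Dict.mk rec).get? "type" with   -- rec['type']; none = KeyError, excluded by Pre_
      | some specialist_type =>
          if PySem.Set.contains st.1 specialist_type then st
          else (PySem.Set.add st.1 specialist_type, st.2 ++ [rec])
      | none => st)
    (PySem.Set.empty, [])
  PySem.List.slice st.2 none (some 4)

-- ===== PORT B =====
def deduplicate_and_prioritize_py_alt (recommendations : List (List (String × String))) : List (List (String × String)) :=
  let st := ["high", "medium", "low"].foldl
    (fun (st : PySem.Set String × List (List (String × String))) level =>
      recommendations.foldl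
        (fun (st : PySem.Set String × List (List (String × String))) rec =>
          let p0 := (PySem.Dict.mk rec).getD "priority" "medium"
          let p := if p0 = "high" ∨ p0 = "low" then p0 else "medium"  -- unknown priorities count as medium
          if p = level then
            match (PySem.Dict.mk rec).get? "type" with   -- rec['type']; none = KeyError, excluded by Pre_
            | some specialist_type =>
                if PySem.Set.contains st.1 specialist_type then st
                else (PySem.Set.add st.1 specialist_type, st.2 ++ [rec])
            | none => st
          else st)
        st)
    (PySem.Set.empty, [])
  PySem.List.slice st.2 none (some 4)

-- ===== PRECONDITION & SPEC =====
-- Pre_ excludes exactly the inputs on which Python A raises KeyError: a recommendation without a 'type' key.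
def Pre_deduplicate_and_prioritize_py (recommendations : List (List (String × String))) : Prop :=
  ∀ rec ∈ recommendations, "type" ∈ rec.map Prod.fst
instance (recommendations : List (List (String × String))) : Decidable (Pre_deduplicate_and_prioritize_py recommendations) := by unfold Pre_deduplicate_and_prioritize_py; infer_instance

def pvWitness_deduplicate_and_prioritize_py : (List (List (String × String))) :=
  [[("type", "cardiology"), ("priority", "high")], [("type", "neurology")], [("type", "cardiology"), ("priority", "low")]]

def Spec_deduplicate_and_prioritize_py (recommendations : List (List (String × String))) (out : List (List (String × String))) : Prop := out = deduplicate_and_prioritize_py_alt recommendations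
instance (recommendations : List (List (String × String))) (out : List (List (String × String))) : Decidable (Spec_deduplicate_and_prioritize_py recommendations out) := by unfold Spec_deduplicate_and_prioritize_py; infer_instance

-- ===== CLAIM (what is proved, stated in full; the proofs are below) =====
def Claim_equal_deduplicate_and_prioritize_py : Prop := ∀ (recommendations : List (List (String × String))), Dom_deduplicate_and_prioritize_py recommendations → Pre_deduplicate_and_prioritize_py recommendations → Spec_deduplicate_and_prioritize_py recommendations (deduplicate_and_prioritize_py recommendations)

-- ===== LEMMAS AND PROOFS =====

-- A's key as a nested if over the raw priority lookup (the dict lookups unfolded)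
lemma pvKeyA_ite (rec : List (String × String)) :
    pvKeyA rec =
      (if (PySem.Dict.mk rec).getD "priority" "medium" = "high" then (3 : Int)
       else if (PySem.Dict.mk rec).getD "priority" "medium" = "medium" then 2
       else if (PySem.Dict.mk rec).getD "priority" "medium" = "low" then 1 else 2) := by
  unfold pvKeyA
  rw [PySem.Dict.getD_eq_get?_getD]
  simp only [PySem.Dict.get?_mk_cons, beq_iff_eq]
  by_cases h1 : (PySem.Dict.mk rec).getD "priority" "medium" = "high"
  · simp [h1]
  · by_cases h2 : (PySem.Dict.mk rec).getD "priority" "medium" = "medium"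
    · simp [h2]
    · by_cases h3 : (PySem.Dict.mk rec).getD "priority" "medium" = "low"
      · simp [h3]
      · have h1' : ¬("high" = (PySem.Dict.mk rec).getD "priority" "medium") := fun e => h1 e.symm
        have h2' : ¬("medium" = (PySem.Dict.mk rec).getD "priority" "medium") := fun e => h2 e.symm
        have h3' : ¬("low" = (PySem.Dict.mk rec).getD "priority" "medium") := fun e => h3 e.symm
        simp [h1, h2, h3, h1', h2', h3', PySem.Dict.get?]

-- A's key only takes the three values of priority_order (default 2)
lemma pvKeyA_cases (rec : List (String × String)) :
    pvKeyA rec = 3 ∨ pvKeyA rec = 2 ∨ pvKeyA rec = 1 := by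
  rw [pvKeyA_ite]; split_ifs <;> simp

-- insertBy skips a block it does not go before
lemma insertBy_append_left {α : Type} (before : α → α → Bool) (x : α) (as bs : List α)
    (h : ∀ y ∈ as, before x y = false) :
    PySem.List.insertBy before x (as ++ bs) = as ++ PySem.List.insertBy before x bs := by
  induction as with
  | nil => simp
  | cons a t ih =>
    simp only [List.cons_append, PySem.List.insertBy]
    rw [h a (by simp)]
    simp [ih (fun y hy => h y (by simp [hy]))]

-- insertBy goes in front of a block it goes before
lemma insertBy_all_before {α : Type} (before : α → α → Bool) (x : α) (bs : List α)
    (h : ∀ y ∈ bs, before x y = true) :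
    PySem.List.insertBy before x bs = x :: bs := by
  cases bs with
  | nil => rfl
  | cons b t => simp [PySem.List.insertBy, h b (by simp)]

-- the three priority filters (A's buckets, described by its numeric key)
def pvF3 (l : List (List (String × String))) : List (List (String × String)) :=
  l.filter (fun r => decide (pvKeyA r = 3))
def pvF1 (l : List (List (String × String))) : List (List (String × String)) :=
  l.filter (fun r => decide (pvKeyA r = 1))
def pvF2 (l : List (List (String × String))) : List (List (String × String)) :=
  l.filter (fun r => !decide (pvKeyA r = 3) && !decide (pvKeyA r = 1))

-- A's stable reverse sort on a 3-valued key IS the bucket concatenation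
lemma sorted_eq_buckets (l : List (List (String × String))) :
    PySem.List.sorted l pvKeyA true = pvF3 l ++ pvF2 l ++ pvF1 l := by
  rw [PySem.List.sorted_rev_eq_foldl_insertBy]
  induction l using List.reverseRecOn with
  | nil => rfl
  | append_singleton l x ih =>
    rw [List.foldl_append, List.foldl_cons, List.foldl_nil, ih]
    have h3 : ∀ y ∈ pvF3 l, pvKeyA y = 3 := by
      intro y hy; simpa [pvF3] using (List.mem_filter.mp hy).2
    have h2 : ∀ y ∈ pvF2 l, pvKeyA y = 2 := by
      intro y hy
      have := (List.mem_filter.mp hy).2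
      rcases pvKeyA_cases y with h | h | h <;> simp_all [pvF2]
    have h1 : ∀ y ∈ pvF1 l, pvKeyA y = 1 := by
      intro y hy; simpa [pvF1] using (List.mem_filter.mp hy).2
    rcases pvKeyA_cases x with hx | hx | hx
    · rw [List.append_assoc,
        insertBy_append_left _ _ _ _ (by intro y hy; simp [h3 y hy, hx]),
        insertBy_all_before _ _ _ (by
          intro y hy
          rcases List.mem_append.mp hy with hy' | hy'
          · simp [h2 y hy', hx]
          · simp [h1 y hy', hx])]
      simp [pvF3, pvF2, pvF1, List.filter_append, hx]
    · rw [insertBy_append_left _ _ _ _ (by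
          intro y hy
          rcases List.mem_append.mp hy with hy' | hy'
          · simp [h3 y hy', hx]
          · simp [h2 y hy', hx]),
        insertBy_all_before _ _ _ (by intro y hy; simp [h1 y hy, hx])]
      simp [pvF3, pvF2, pvF1, List.filter_append, hx]
    · rw [PySem.List.insertBy_of_forall_not_before _ _ _ (by
        intro y hy
        rcases List.mem_append.mp hy with hy' | hy'
        · rcases List.mem_append.mp hy' with hy'' | hy''
          · simp [h3 y hy'', hx]
          · simp [h2 y hy'', hx]
        · simp [h1 y hy', hx])]
      simp [pvF3, pvF2, pvF1, List.filter_append, hx]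

-- B's per-level selection condition picks out exactly A's buckets
set_option maxRecDepth 8000 in
lemma filter_high_eq (l : List (List (String × String))) :
    l.filter (fun rec =>
        decide ((if (PySem.Dict.mk rec).getD "priority" "medium" = "high" ∨
                    (PySem.Dict.mk rec).getD "priority" "medium" = "low"
                 then (PySem.Dict.mk rec).getD "priority" "medium" else "medium") = "high"))
      = pvF3 l := by
  unfold pvF3
  apply List.filter_congr
  intro r _
  simp only [pvKeyA_ite]
  by_cases h : (PySem.Dict.mk r).getD "priority" "medium" = "high" <;>
    by_cases h' : (PySem.Dict.mk r).getD "priority" "medium" = "low" <;>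
      simp_all

set_option maxRecDepth 8000 in
lemma filter_low_eq (l : List (List (String × String))) :
    l.filter (fun rec =>
        decide ((if (PySem.Dict.mk rec).getD "priority" "medium" = "high" ∨
                    (PySem.Dict.mk rec).getD "priority" "medium" = "low"
                 then (PySem.Dict.mk rec).getD "priority" "medium" else "medium") = "low"))
      = pvF1 l := by
  unfold pvF1
  apply List.filter_congr
  intro r _
  simp only [pvKeyA_ite]
  by_cases h : (PySem.Dict.mk r).getD "priority" "medium" = "high" <;>
    by_cases h' : (PySem.Dict.mk r).getD "priority" "medium" = "low" <;>
      simp_all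

set_option maxRecDepth 8000 in
lemma filter_med_eq (l : List (List (String × String))) :
    l.filter (fun rec =>
        decide ((if (PySem.Dict.mk rec).getD "priority" "medium" = "high" ∨
                    (PySem.Dict.mk rec).getD "priority" "medium" = "low"
                 then (PySem.Dict.mk rec).getD "priority" "medium" else "medium") = "medium"))
      = pvF2 l := by
  unfold pvF2
  apply List.filter_congr
  intro r _
  simp only [pvKeyA_ite]
  by_cases h : (PySem.Dict.mk r).getD "priority" "medium" = "high" <;>
    by_cases h' : (PySem.Dict.mk r).getD "priority" "medium" = "low" <;>
      by_cases h'' : (PySem.Dict.mk r).getD "priority" "medium" = "medium" <;>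
        simp_all

-- ===== VERDICT (by name: the statement is the Claim_ definition above) =====
theorem deduplicate_and_prioritize_py_spec : Claim_equal_deduplicate_and_prioritize_py := by
  intro recs _ _
  unfold Spec_deduplicate_and_prioritize_py
  unfold deduplicate_and_prioritize_py deduplicate_and_prioritize_py_alt
  rw [sorted_eq_buckets]
  simp only [List.foldl_cons, List.foldl_nil]
  rw [PySem.List.foldl_ite_eq_foldl_filter, PySem.List.foldl_ite_eq_foldl_filter,
    PySem.List.foldl_ite_eq_foldl_filter,
    filter_high_eq, filter_med_eq, filter_low_eq,
    List.foldl_append, List.foldl_append]
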